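-- pv_equiv track=rewrite | github.com/pypi-data/pypi-mirror-366 | packages/sanakirja-org/sanakirja_org-1.1.2-py3-none-any.whl/sanakirja/cli.py | _resolve_show_fields
-- ===== SOURCE A (Python) =====
-- from typing import Set, Union
--
-- AVAILABLE_FIELDS = {
--     "id", "url", "source_language", "target_language", "word", "transliteration", "gender", "additional_source_languages",
--     "relations", "did_you_mean", "suggestions", "found_examples", "alternative_spellings", "multiple_spellings",
--     "synonyms", "pronunciations", "abbreviations", "inflections", "definitions", "examples", "categories", "translations"
-- }
--
-- def _resolve_show_fields(show_arg: str) -> Set[str]: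
--     """
--     Resolve the omitted fields from the `show` argument.
--
--     :param show_arg: The contents of the `show` argument in `str` format.
--     :type show_arg: str
--     :return: The omitted fields as a set of strings.
--     :rtype: set[str]
--     """
--     parts = {ppart for part in show_arg.split(",") if (ppart := part.strip().lower()) and ppart in AVAILABLE_FIELDS}
--
--     omitted = set() if "all" in parts or all(part.startswith("-") for part in parts) else AVAILABLE_FIELDS.copy()
--     if "all" in parts: parts.remove("all")
--
--     for part in parts:
--         key = part.lstrip("-")
--
--         if part.startswith("-") and key not in omitted: omitted.add(key)
--         elif not part.startswith("-") and key in omitted: omitted.remove(key)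
--
--     return omitted
-- ===== SOURCE B (Python) =====
-- from typing import Set, Union
--
-- AVAILABLE_FIELDS = {
--     "id", "url", "source_language", "target_language", "word", "transliteration", "gender", "additional_source_languages",
--     "relations", "did_you_mean", "suggestions", "found_examples", "alternative_spellings", "multiple_spellings",
--     "synonyms", "pronunciations", "abbreviations", "inflections", "definitions", "examples", "categories", "translations"
-- }
--
-- def _resolve_show_fields(show_arg: str) -> Set[str]:
--     tokens = [part.strip().lower() for part in show_arg.split(",")]
--     omitted = set()
--     found = False
--     for field in AVAILABLE_FIELDS:
--         if field in tokens:
--             found = True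
--         else:
--             omitted.add(field)
--     return omitted if found else set()
-- ===== Notes on version B (the rewrite author's own statement) =====
-- stated objective: alternative
-- what changed: B inverts the traversal: instead of A's building a parts set and mutating an omitted copy of AVAILABLE_FIELDS token by token, B makes one pass over AVAILABLE_FIELDS itself, adding each field not found among the stripped/lowered tokens to the result and tracking with a flag whether any field was selected (returning the empty set when none was).
import Mathlib
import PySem

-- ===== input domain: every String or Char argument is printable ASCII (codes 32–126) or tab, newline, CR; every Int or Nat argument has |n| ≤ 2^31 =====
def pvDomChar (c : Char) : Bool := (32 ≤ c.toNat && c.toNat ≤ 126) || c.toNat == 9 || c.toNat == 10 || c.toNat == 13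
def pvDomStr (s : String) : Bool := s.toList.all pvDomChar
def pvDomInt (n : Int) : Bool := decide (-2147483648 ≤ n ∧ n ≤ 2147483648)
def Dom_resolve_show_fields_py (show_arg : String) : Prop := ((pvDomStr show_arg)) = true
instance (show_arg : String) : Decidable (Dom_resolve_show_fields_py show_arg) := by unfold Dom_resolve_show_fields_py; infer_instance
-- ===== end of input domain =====

-- B inverts the traversal: one pass over AVAILABLE_FIELDS itself, collecting each field not found among
-- the stripped/lowered tokens and tracking with a flag whether any field was selected, instead of A's
-- parts set plus a mutated `omitted` copy of AVAILABLE_FIELDS.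

-- shared module constant AVAILABLE_FIELDS and two tiny primitive wrappers
def pvFieldsList : List String :=
  ["id", "url", "source_language", "target_language", "word", "transliteration", "gender",
   "additional_source_languages", "relations", "did_you_mean", "suggestions", "found_examples",
   "alternative_spellings", "multiple_spellings", "synonyms", "pronunciations", "abbreviations",
   "inflections", "definitions", "examples", "categories", "translations"]

def pvAVAILABLE_FIELDS : PySem.Set String := PySem.Set.ofList pvFieldsList

-- s.split(","): the separator is the non-empty literal ",", so split? is always `some`
def pySplitComma (s : String) : List String := (PySem.Str.split? s ",").getD []

-- hand port of s.lstrip("-") for the single-char set "-": drop the leading '-' characters; exact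
def pyLstripDash (s : String) : String := String.ofList (s.toList.dropWhile (fun c => c == '-'))

-- ===== PORT A =====
def resolve_show_fields_py (show_arg : String) : List String :=
  let parts : PySem.Set String :=
    (pySplitComma show_arg).foldl (fun s part =>
      let ppart := PySem.Str.lower (PySem.Str.strip part)
      if !(ppart == "") && PySem.Set.contains pvAVAILABLE_FIELDS ppart then PySem.Set.add s ppart
      else s) PySem.Set.empty
  let omitted : PySem.Set String :=
    if PySem.Set.contains parts "all" || parts.all (fun part => PySem.Str.startswith part "-") then
      PySem.Set.empty
    else pvAVAILABLE_FIELDS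
  let parts2 : PySem.Set String :=
    if PySem.Set.contains parts "all" then (PySem.Set.remove? parts "all").getD parts else parts
  parts2.foldl (fun omitted part =>
    let key := pyLstripDash part
    if PySem.Str.startswith part "-" && !(PySem.Set.contains omitted key) then
      PySem.Set.add omitted key
    else if !(PySem.Str.startswith part "-") && PySem.Set.contains omitted key then
      -- set.remove(key): `key in omitted` holds in this branch, so remove? is `some`
      (PySem.Set.remove? omitted key).getD omitted
    else omitted) omitted

-- ===== PORT B =====
def resolve_show_fields_py_alt (show_arg : String) : List String :=
  let tokens : List String := (pySplitComma show_arg).map (fun part => PySem.Str.lower (PySem.Str.strip part))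
  let st : PySem.Set String × Bool :=
    pvFieldsList.foldl (fun (p : PySem.Set String × Bool) field =>
      if tokens.contains field then (p.1, true) else (PySem.Set.add p.1 field, p.2))
      (PySem.Set.empty, false)
  if st.2 then st.1 else []

-- ===== PRECONDITION & SPEC =====
def Spec_resolve_show_fields_py (show_arg : String) (out : List String) : Prop := out = resolve_show_fields_py_alt show_arg
instance (show_arg : String) (out : List String) : Decidable (Spec_resolve_show_fields_py show_arg out) := by unfold Spec_resolve_show_fields_py; infer_instance

-- ===== CLAIM (what is proved, stated in full; the proofs are below) =====
def Claim_equal_resolve_show_fields_py : Prop := ∀ (show_arg : String), Dom_resolve_show_fields_py show_arg → Spec_resolve_show_fields_py show_arg (resolve_show_fields_py show_arg)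

-- ===== LEMMAS AND PROOFS =====

-- every available field: no leading dash, lstrip("-") is the identity, and it is not "all"
set_option maxHeartbeats 2000000 in
theorem pvFields_facts : ∀ x ∈ pvFieldsList,
    PySem.Str.startswith x "-" = false ∧ pyLstripDash x = x ∧ x ≠ "all" := by decide

theorem pvFields_nodup : pvFieldsList.Nodup := by decide

-- the comprehension's truthiness test `ppart and ppart in AVAILABLE_FIELDS` equals plain membership
set_option maxHeartbeats 1000000 in
theorem cond_eq (q : String) : (!(q == "") && PySem.Set.contains pvAVAILABLE_FIELDS q) = PySem.Set.contains pvAVAILABLE_FIELDS q := by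
  by_cases hq : q = ""
  · subst hq; decide
  · simp [hq]

-- A's guarded set-comprehension fold builds exactly the set of the filtered token list
theorem partsA_eq_filter_fold (l : List String) (s : PySem.Set String) :
    l.foldl (fun s part =>
      let ppart := PySem.Str.lower (PySem.Str.strip part)
      if !(ppart == "") && PySem.Set.contains pvAVAILABLE_FIELDS ppart then PySem.Set.add s ppart
      else s) s
    = ((l.map (fun part => PySem.Str.lower (PySem.Str.strip part))).filter
        (fun t => PySem.Set.contains pvAVAILABLE_FIELDS t)).foldl PySem.Set.add s := by
  rw [List.foldl_filter, List.foldl_map]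
  exact PySem.List.foldl_congr_mem _ _ _ _ (fun acc x _ => by simp only [cond_eq])

-- folding pointwise-removal over a list removes exactly the list's members
theorem foldl_filter_ne (l : List String) (s : List String) :
    l.foldl (fun om p => om.filter (fun y => !(y == p))) s
    = s.filter (fun y => !(l.contains y)) := by
  induction l generalizing s with
  | nil => simp
  | cons a l ih =>
    simp only [List.foldl_cons, ih, List.filter_filter]
    apply List.filter_congr
    intro y _
    simp only [List.contains_cons]
    by_cases hy : y = a <;> simp [hy, Bool.and_comm]

-- B's single pass over a duplicate-free field list, with accumulator generalized
theorem foldB (tokens : List String) (l : List String) (acc : List String) (b : Bool)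
    (hnd : l.Nodup) (hdisj : ∀ x ∈ l, x ∉ acc) :
    l.foldl (fun (p : PySem.Set String × Bool) field =>
        if tokens.contains field then (p.1, true) else (PySem.Set.add p.1 field, p.2)) (acc, b)
    = (acc ++ l.filter (fun y => !(tokens.contains y)), b || l.any (fun y => tokens.contains y)) := by
  induction l generalizing acc b with
  | nil => simp
  | cons a l ih =>
    rcases List.nodup_cons.mp hnd with ⟨ha, hnd'⟩
    by_cases hc : tokens.contains a = true
    · have ha' : a ∈ tokens := by simpa using hc
      simp only [List.foldl_cons, hc, if_true]
      rw [ih acc true hnd' (fun x hx => hdisj x (List.mem_cons_of_mem _ hx))]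
      simp [ha']
    · have ha' : a ∉ tokens := by simpa using hc
      have ha2 : a ∉ acc := hdisj a List.mem_cons_self
      have hadd : PySem.Set.add acc a = acc ++ [a] := by
        simp [PySem.Set.add, PySem.Set.contains, List.contains_eq_mem, ha2]
      simp only [List.foldl_cons, hc, if_false, hadd, Bool.false_eq_true]
      rw [ih (acc ++ [a]) b hnd' ?_]
      · simp [ha']
      · intro x hx
        simp only [List.mem_append, List.mem_singleton]
        rintro (h | rfl)
        · exact hdisj x (List.mem_cons_of_mem _ hx) h
        · exact ha hx

theorem resolve_show_fields_py_spec' (show_arg : String) :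
    resolve_show_fields_py show_arg = resolve_show_fields_py_alt show_arg := by
  unfold resolve_show_fields_py resolve_show_fields_py_alt
  rw [partsA_eq_filter_fold]
  set tokens := (pySplitComma show_arg).map (fun part => PySem.Str.lower (PySem.Str.strip part)) with htok
  set L := tokens.filter (fun t => PySem.Set.contains pvAVAILABLE_FIELDS t) with hL
  have hfold : L.foldl PySem.Set.add PySem.Set.empty = PySem.Set.ofList L := rfl
  rw [hfold]
  have hB := foldB tokens pvFieldsList [] false pvFields_nodup (fun x _ => List.not_mem_nil)
  simp only [PySem.Set.empty] at *
  rw [hB]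
  simp only [List.nil_append]
  set S : PySem.Set String := PySem.Set.ofList L with hS
  -- every element of S is an available field
  have hsub : ∀ x ∈ S, x ∈ pvFieldsList := by
    intro x hx
    rw [hS, PySem.Set.mem_ofList] at hx
    rw [hL] at hx
    have hc := List.of_mem_filter hx
    have : x ∈ pvAVAILABLE_FIELDS := by
      simpa [PySem.Set.contains, List.contains_iff_exists_mem_beq, beq_iff_eq] using hc
    rwa [pvAVAILABLE_FIELDS, PySem.Set.mem_ofList] at this
  -- for a field y: y ∈ S iff y ∈ tokens
  have hmemS : ∀ y ∈ pvFieldsList, (PySem.Set.contains S y = tokens.contains y) := by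
    intro y hy
    have hyA : PySem.Set.contains pvAVAILABLE_FIELDS y = true := by
      simpa [PySem.Set.contains, List.contains_eq_mem, pvAVAILABLE_FIELDS, PySem.Set.mem_ofList]
        using hy
    have hiff : (y ∈ S) ↔ (y ∈ tokens) := by
      rw [hS, PySem.Set.mem_ofList, hL, List.mem_filter]
      exact ⟨fun h => h.1, fun h => ⟨h, hyA⟩⟩
    simp [PySem.Set.contains, List.contains_eq_mem, hiff]
  rcases eq_or_ne S [] with hnil | hne
  · -- nothing selected: A returns set(); B's found flag stays false
    have hanyf : pvFieldsList.any (fun y => tokens.contains y) = false := by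
      rw [Bool.eq_false_iff]
      intro h
      rw [List.any_eq_true] at h
      rcases h with ⟨y, hy, hyt⟩
      have hyS : PySem.Set.contains S y = true := (hmemS y hy).symm ▸ hyt
      have : y ∈ S := by
        simpa [PySem.Set.contains, List.contains_eq_mem] using hyS
      rw [hnil] at this
      exact absurd this (List.not_mem_nil)
    rw [hnil]
    simp only [Bool.false_or, hanyf, Bool.false_eq_true, if_false]
    rfl
  · -- something selected: the flag is true and both sides filter the field list
    obtain ⟨a, haS⟩ := List.exists_mem_of_ne_nil S hne
    have hat : tokens.contains a = true := by
      rw [← hmemS a (hsub a haS)]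
      simpa [PySem.Set.contains, List.contains_eq_mem] using haS
    have hanyT : pvFieldsList.any (fun y => tokens.contains y) = true := by
      rw [List.any_eq_true]
      exact ⟨a, hsub a haS, hat⟩
    have hall : PySem.Set.contains S "all" = false := by
      rw [Bool.eq_false_iff]
      intro hc
      have : "all" ∈ S := by
        simpa [PySem.Set.contains, List.contains_eq_mem] using hc
      exact ((pvFields_facts _ (hsub _ this)).2.2) rfl
    have hdash : S.all (fun part => PySem.Str.startswith part "-") = false := by
      rw [Bool.eq_false_iff]
      intro hA
      rw [List.all_eq_true] at hA
      have := hA a haS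
      rw [(pvFields_facts _ (hsub _ haS)).1] at this
      exact Bool.false_ne_true this
    simp only [hall, hdash, hanyT, Bool.or_self, Bool.false_eq_true, if_false]
    rw [if_pos (show (false || true) = true from rfl)]
    -- rewrite A's loop body for members of S, then compute the fold as a filter
    rw [PySem.List.foldl_congr_mem S _ (fun om p => om.filter (fun y => !(y == p)))
      pvAVAILABLE_FIELDS ?_]
    · rw [foldl_filter_ne]
      have hAF : pvAVAILABLE_FIELDS = pvFieldsList := by decide
      rw [hAF]
      apply List.filter_congr
      intro y hy
      rw [show (List.contains S y) = PySem.Set.contains S y from rfl, hmemS y hy]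
    · intro om x hx
      obtain ⟨hsw, hkey, -⟩ := pvFields_facts _ (hsub _ hx)
      simp only [hkey, hsw, Bool.false_and, Bool.false_eq_true, if_false, Bool.not_false,
        Bool.true_and]
      by_cases hm : x ∈ om
      · simp [PySem.Set.remove?, PySem.Set.discard, PySem.Set.contains, hm]
      · have hd : List.contains om x = false := by
          simp [hm]
        simp only [PySem.Set.remove?, PySem.Set.discard, PySem.Set.contains, hd,
          Bool.false_eq_true, if_false]
        refine (List.filter_eq_self.mpr ?_).symm
        intro y hy
        simp only [Bool.not_eq_eq_eq_not, Bool.not_true, beq_eq_false_iff_ne, ne_eq]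
        rintro rfl
        exact hm hy

-- ===== VERDICT (by name: the statement is the Claim_ definition above) =====
theorem resolve_show_fields_py_spec : Claim_equal_resolve_show_fields_py := by
  intro show_arg _
  exact resolve_show_fields_py_spec' show_arg
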